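-- pv_equiv track=rewrite | github.com/zsofiam/keymaker-python | keymaker.py | zig_zag_concatenate
-- ===== SOURCE A (Python) =====
-- def zig_zag_concatenate(matrix):
--     new_word = ""
--     for column in range(len(matrix[0])):
--         for j in range(len(matrix)):
--             if not column % 2 == 0:
--                 row = len(matrix) - 1 - j
--             else:
--                 row = j
--             new_word += matrix[row][column]
--     return new_word
-- ===== SOURCE B (Python) =====
-- def zig_zag_concatenate(matrix):
--     buckets = ["" for _ in range(len(matrix[0]))]
--     for row in matrix:
--         for c in range(len(buckets)):
--             if c % 2 == 0:
--                 buckets[c] = buckets[c] + row[c]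
--             else:
--                 buckets[c] = row[c] + buckets[c]
--     return "".join(buckets)
-- ===== Notes on version B (the rewrite author's own statement) =====
-- stated objective: alternative
-- what changed: B makes a single row-major pass keeping one accumulator string per column (appending for even columns, prepending for odd ones) and joins them at the end, instead of A's column-major nested loop that recomputes a flipped row index len(matrix)-1-j for every cell.
import Mathlib
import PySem

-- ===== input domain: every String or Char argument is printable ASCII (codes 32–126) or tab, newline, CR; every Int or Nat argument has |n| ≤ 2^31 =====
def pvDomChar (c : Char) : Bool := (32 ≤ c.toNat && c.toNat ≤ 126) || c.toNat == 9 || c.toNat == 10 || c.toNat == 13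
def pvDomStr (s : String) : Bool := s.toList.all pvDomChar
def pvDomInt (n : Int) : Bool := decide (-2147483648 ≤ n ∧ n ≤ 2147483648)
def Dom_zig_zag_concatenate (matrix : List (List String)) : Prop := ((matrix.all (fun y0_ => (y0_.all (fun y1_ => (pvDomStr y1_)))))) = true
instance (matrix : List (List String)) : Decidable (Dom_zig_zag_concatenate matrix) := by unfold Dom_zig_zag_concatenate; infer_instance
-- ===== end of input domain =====

-- B replaces A's column-major index-flipping loop by a single row-major pass over the
-- matrix with one accumulator per column (prepend on odd columns), joined at the end
-- (alternative decomposition; return value only).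


-- ===== PORT A =====
def zig_zag_concatenate (matrix : List (List String)) : String :=
  (PySem.List.pyRange 0 (PySem.List.len (PySem.List.pyGetD matrix 0 [])) 1).foldl
    (fun new_word column =>
      (PySem.List.pyRange 0 (PySem.List.len matrix) 1).foldl
        (fun nw j =>
          let row : Int :=
            if ¬ (PySem.Int.mod column 2 == 0) then PySem.List.len matrix - 1 - j else j
          nw ++ PySem.List.pyGetD (PySem.List.pyGetD matrix row []) column "")
        new_word)
    ""

-- ===== PORT B =====
def zig_zag_concatenate_alt (matrix : List (List String)) : String :=
  let buckets0 : List String :=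
    (PySem.List.pyRange 0 (PySem.List.len (PySem.List.pyGetD matrix 0 [])) 1).map (fun _ => "")
  let final : List String :=
    matrix.foldl
      (fun buckets row =>
        (PySem.List.pyRange 0 (PySem.List.len buckets) 1).foldl
          (fun bs c =>
            if PySem.Int.mod c 2 == 0 then
              PySem.List.pySetD bs c (PySem.List.pyGetD bs c "" ++ PySem.List.pyGetD row c "")
            else
              PySem.List.pySetD bs c (PySem.List.pyGetD row c "" ++ PySem.List.pyGetD bs c ""))
          buckets)
      buckets0
  String.join final

-- ===== PRECONDITION & SPEC =====
-- Pre_ excludes exactly the inputs where the Python A raises IndexError: the empty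
-- matrix (matrix[0]) and matrices with some row shorter than the first row.
def Pre_zig_zag_concatenate (matrix : List (List String)) : Prop :=
  matrix ≠ [] ∧ ∀ row ∈ matrix, (matrix.headD []).length ≤ row.length
instance (matrix : List (List String)) : Decidable (Pre_zig_zag_concatenate matrix) := by
  unfold Pre_zig_zag_concatenate; infer_instance
def pvWitness_zig_zag_concatenate : List (List String) := [["a", "b"], ["c", "d"], ["e", "f"]]
def Spec_zig_zag_concatenate (matrix : List (List String)) (out : String) : Prop := out = zig_zag_concatenate_alt matrix
instance (matrix : List (List String)) (out : String) : Decidable (Spec_zig_zag_concatenate matrix out) := by unfold Spec_zig_zag_concatenate; infer_instance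

-- ===== CLAIM (what is proved, stated in full; the proofs are below) =====
def Claim_equal_zig_zag_concatenate : Prop := ∀ (matrix : List (List String)), Dom_zig_zag_concatenate matrix → Pre_zig_zag_concatenate matrix → Spec_zig_zag_concatenate matrix (zig_zag_concatenate matrix)

-- ===== LEMMAS AND PROOFS =====

-- the column as a list of cells, and the (possibly reversed) column string
def colL (matrix : List (List String)) (k : Nat) : List String :=
  matrix.map (fun row => PySem.List.pyGetD row (k : Int) "")
def colStr (matrix : List (List String)) (k : Nat) : String :=
  String.join (if k % 2 = 0 then colL matrix k else (colL matrix k).reverse)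

lemma foldl_append_shift (l : List String) (a b : String) :
    l.foldl (fun r s => r ++ s) (a ++ b) = a ++ l.foldl (fun r s => r ++ s) b := by
  induction l generalizing b with
  | nil => rfl
  | cons x xs ih => simp only [List.foldl_cons, String.append_assoc, ih]

-- a string-accumulating 'for' loop is the join of the mapped list
lemma foldl_str_append {α : Type} (l : List α) (f : α → String) (init : String) :
    l.foldl (fun acc x => acc ++ f x) init = init ++ String.join (l.map f) := by
  induction l generalizing init with
  | nil => simp [String.join]
  | cons x xs ih =>
      simp only [List.foldl_cons, List.map_cons, String.join] at *
      have h := foldl_append_shift (List.map f xs) (f x) ""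
      rw [String.append_empty] at h
      rw [ih, String.empty_append, h, ← String.append_assoc]

-- the odd-column index flip 'len - 1 - j' enumerates the rows in reverse
lemma map_flip (n : Nat) {α : Type} (G : Int → α) :
    (PySem.List.pyRange 0 (n : Int) 1).map (fun j => G ((n : Int) - 1 - j))
      = ((PySem.List.pyRange 0 (n : Int) 1).map G).reverse := by
  have h2 := PySem.List.pyRange_neg_one_eq_reverse (a := (n : Int) - 1) (b := -1)
  have h3 : (-1 : Int) + 1 = 0 := by ring
  have h4 : (n : Int) - 1 + 1 = n := by ring
  rw [h3, h4] at h2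
  have h1 : (PySem.List.pyRange 0 (n : Int) 1).map (fun j => (n : Int) - 1 - j)
      = (PySem.List.pyRange 0 (n : Int) 1).reverse := by
    rw [← h2, PySem.List.pyRange_neg_one, PySem.List.pyRange_one]
    simp only [List.map_map]
    have h5 : ((n : Int) - 1 - -1).toNat = ((n : Int) - 0).toNat := by norm_num
    rw [← h5]
    apply List.map_congr_left
    intro k _
    simp only [Function.comp]
    omega
  calc (PySem.List.pyRange 0 (n : Int) 1).map (fun j => G ((n : Int) - 1 - j))
      = ((PySem.List.pyRange 0 (n : Int) 1).map (fun j => (n : Int) - 1 - j)).map G := by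
        rw [List.map_map]; rfl
    _ = ((PySem.List.pyRange 0 (n : Int) 1).map G).reverse := by rw [h1, List.map_reverse]

lemma mod_two_cast (k : Nat) : PySem.Int.mod (k : Int) 2 = ((k % 2 : Nat) : Int) := by
  rw [PySem.Int.mod_eq_emod_of_pos (by norm_num : (0:Int) < 2)]
  omega

-- the rows of column k of A, in loop order, as a list map over the matrix
lemma map_cell_even (matrix : List (List String)) (k : Nat) :
    (PySem.List.pyRange 0 (matrix.length : Int) 1).map
        (fun j => PySem.List.pyGetD (PySem.List.pyGetD matrix j []) (k : Int) "")
      = colL matrix k := by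
  have h := PySem.List.map_pyGetD_pyRange_zero' (xs := matrix) (d := ([] : List String))
  calc (PySem.List.pyRange 0 (matrix.length : Int) 1).map
        (fun j => PySem.List.pyGetD (PySem.List.pyGetD matrix j []) (k : Int) "")
      = ((PySem.List.pyRange 0 (matrix.length : Int) 1).map
          (fun j => PySem.List.pyGetD matrix j [])).map
            (fun row => PySem.List.pyGetD row (k : Int) "") := by rw [List.map_map]; rfl
    _ = colL matrix k := by rw [h]; rfl

-- A's inner loop for column k produces exactly colStr k
lemma A_col (matrix : List (List String)) (k : Nat) :
    String.join ((PySem.List.pyRange 0 (matrix.length : Int) 1).map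
      (fun j => PySem.List.pyGetD
        (PySem.List.pyGetD matrix
          (if ¬ (PySem.Int.mod (k : Int) 2 == 0) then (matrix.length : Int) - 1 - j else j) [])
        (k : Int) ""))
      = colStr matrix k := by
  by_cases hk : k % 2 = 0
  · simp only [mod_two_cast, hk, colStr]
    simp only [Nat.cast_zero, beq_self_eq_true, not_true_eq_false, if_false, ite_true]
    exact congrArg _ (map_cell_even matrix k)
  · have h1 : k % 2 = 1 := Nat.mod_two_ne_zero.mp hk
    simp only [mod_two_cast, colStr, h1, Nat.cast_one]
    norm_num [-PySem.List.pyGetD_natCast]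
    have hf := map_flip matrix.length
      (fun i => PySem.List.pyGetD (PySem.List.pyGetD matrix i []) (k : Int) "")
    beta_reduce at hf
    rw [hf, ← map_cell_even matrix k]

-- the column list written over the Int range A iterates
lemma range_map_colStr (matrix : List (List String)) :
    (List.range ((matrix.getD 0 []).length)).map (fun k => colStr matrix k)
      = (PySem.List.pyRange 0 (((matrix.getD 0 []).length : Int)) 1).map
          (fun c => colStr matrix c.toNat) := by
  rw [PySem.List.pyRange_one, List.map_map]
  apply List.map_congr_left
  intro k _
  simp only [Function.comp, zero_add, Int.toNat_natCast]

-- A is the join over columns of the (possibly reversed) column strings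
lemma A_eq (matrix : List (List String)) :
    zig_zag_concatenate matrix
      = String.join ((List.range ((matrix.getD 0 []).length)).map (fun k => colStr matrix k)) := by
  unfold zig_zag_concatenate
  simp only [PySem.List.len_eq, PySem.List.pyGetD_zero, foldl_str_append, String.empty_append]
  rw [range_map_colStr]
  apply congrArg
  apply List.map_congr_left
  intro c hc
  obtain ⟨h0, hlt⟩ := PySem.List.mem_pyRange_one.mp hc
  lift c to Nat using h0 with k
  simp only [Int.toNat_natCast]
  exact A_col matrix k

-- ========== B side ==========

-- one bucket update of B's inner loop
def bstep (row : List String) (bs : List String) (c : Int) : List String :=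
  if PySem.Int.mod c 2 == 0 then
    PySem.List.pySetD bs c (PySem.List.pyGetD bs c "" ++ PySem.List.pyGetD row c "")
  else
    PySem.List.pySetD bs c (PySem.List.pyGetD row c "" ++ PySem.List.pyGetD bs c "")

-- one full row pass of B
def rowPass (row bs : List String) : List String :=
  (PySem.List.pyRange 0 (PySem.List.len bs) 1).foldl (bstep row) bs

lemma alt_eq_rowPass (matrix : List (List String)) :
    zig_zag_concatenate_alt matrix
      = String.join (matrix.foldl (fun bs row => rowPass row bs)
          ((PySem.List.pyRange 0 (PySem.List.len (PySem.List.pyGetD matrix 0 [])) 1).map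
            (fun _ => ""))) := rfl

-- the partial inner fold: indices < m updated, others untouched
lemma seg_spec (row bs : List String) (m : Nat) (hm : m ≤ bs.length) :
    ((List.range m).foldl (fun b (k : Nat) => bstep row b (k : Int)) bs).length = bs.length ∧
    ∀ j : Nat, ((List.range m).foldl (fun b (k : Nat) => bstep row b (k : Int)) bs).getD j ""
      = if j < m then
          (if j % 2 = 0 then bs.getD j "" ++ PySem.List.pyGetD row (j : Int) ""
           else PySem.List.pyGetD row (j : Int) "" ++ bs.getD j "")
        else bs.getD j "" := by
  induction m with
  | zero => exact ⟨rfl, fun j => by simp⟩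
  | succ n ih =>
      obtain ⟨ihlen, ihval⟩ := ih (Nat.le_of_succ_le hm)
      set r := (List.range n).foldl (fun b (k : Nat) => bstep row b (k : Int)) bs with hr
      have hnlen : n < r.length := by rw [ihlen]; omega
      have hstep : (List.range (n+1)).foldl (fun b (k : Nat) => bstep row b (k : Int)) bs
          = bstep row r (n : Int) := by
        rw [List.range_succ, List.foldl_append, List.foldl_cons, List.foldl_nil]
      have hrn : r.getD n "" = bs.getD n "" := by
        rw [ihval n]; simp
      have hget : PySem.List.pyGetD r (n : Int) "" = bs.getD n "" := by
        rw [PySem.List.pyGetD_natCast, hrn]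
      by_cases hpar : n % 2 = 0
      · have hb : bstep row r (n : Int)
            = r.set n (bs.getD n "" ++ PySem.List.pyGetD row (n : Int) "") := by
          unfold bstep
          rw [mod_two_cast n, hpar]
          simp [hget]
        refine ⟨?_, ?_⟩
        · rw [hstep, hb]; simp [ihlen]
        · intro j
          rw [hstep, hb]
          by_cases hj : j = n
          · subst hj
            rw [List.getD_eq_getElem?_getD, List.getElem?_set_self hnlen]
            simp [hpar]
          · rw [List.getD_eq_getElem?_getD, List.getElem?_set_ne (fun h => hj h.symm),
              ← List.getD_eq_getElem?_getD, ihval j]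
            have : (j < n) = (j < n + 1) := by
              by_cases h : j < n <;> simp [h] <;> omega
            split_ifs with h1 h2 h2 <;> first | rfl | omega
      · have hb : bstep row r (n : Int)
            = r.set n (PySem.List.pyGetD row (n : Int) "" ++ bs.getD n "") := by
          unfold bstep
          have h1 : n % 2 = 1 := Nat.mod_two_ne_zero.mp hpar
          rw [mod_two_cast n, h1]
          simp [hget]
        refine ⟨?_, ?_⟩
        · rw [hstep, hb]; simp [ihlen]
        · intro j
          rw [hstep, hb]
          by_cases hj : j = n
          · subst hj
            rw [List.getD_eq_getElem?_getD, List.getElem?_set_self hnlen]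
            simp [hpar]
          · rw [List.getD_eq_getElem?_getD, List.getElem?_set_ne (fun h => hj h.symm),
              ← List.getD_eq_getElem?_getD, ihval j]
            split_ifs with h1 h2 h2 <;> first | rfl | omega

-- rowPass written as the Nat-range fold of seg_spec
lemma rowPass_eq_seg (row bs : List String) :
    rowPass row bs = (List.range bs.length).foldl (fun b (k : Nat) => bstep row b (k : Int)) bs := by
  unfold rowPass
  rw [PySem.List.len_eq, PySem.List.pyRange_one, List.foldl_map]
  simp only [Int.sub_zero, Int.toNat_natCast, zero_add]

lemma rowPass_length (row bs : List String) : (rowPass row bs).length = bs.length := by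
  rw [rowPass_eq_seg]; exact (seg_spec row bs bs.length le_rfl).1

lemma rowPass_getD (row bs : List String) (j : Nat) (hj : j < bs.length) :
    (rowPass row bs).getD j ""
      = if j % 2 = 0 then bs.getD j "" ++ PySem.List.pyGetD row (j : Int) ""
        else PySem.List.pyGetD row (j : Int) "" ++ bs.getD j "" := by
  rw [rowPass_eq_seg]
  rw [(seg_spec row bs bs.length le_rfl).2 j, if_pos hj]

lemma join_cons (x : String) (l : List String) :
    String.join (x :: l) = x ++ String.join l := by
  simp only [String.join, List.foldl_cons, String.empty_append]
  have h := foldl_append_shift l x ""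
  rw [String.append_empty] at h
  exact h

-- String.join distributes over append
lemma join_append (l1 l2 : List String) :
    String.join (l1 ++ l2) = String.join l1 ++ String.join l2 := by
  induction l1 with
  | nil => simp [String.join]
  | cons x xs ih =>
      rw [List.cons_append, join_cons, ih, join_cons, String.append_assoc]

-- the outer fold: per-column accumulation over all rows
lemma rows_length (rows : List (List String)) (bs : List String) :
    (rows.foldl (fun b r => rowPass r b) bs).length = bs.length := by
  induction rows generalizing bs with
  | nil => rfl
  | cons r rs ih => rw [List.foldl_cons, ih, rowPass_length]

lemma rows_getD (rows : List (List String)) (bs : List String) (k : Nat) (hk : k < bs.length) :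
    (rows.foldl (fun b r => rowPass r b) bs).getD k ""
      = if k % 2 = 0 then bs.getD k "" ++ String.join (colL rows k)
        else String.join ((colL rows k).reverse) ++ bs.getD k "" := by
  induction rows generalizing bs with
  | nil =>
      by_cases h : k % 2 = 0 <;> simp [colL, String.join, h]
  | cons r rs ih =>
      rw [List.foldl_cons, ih (rowPass r bs) (by rw [rowPass_length]; exact hk),
        rowPass_getD r bs k hk]
      have hcol : colL (r :: rs) k
          = PySem.List.pyGetD r (k : Int) "" :: colL rs k := rfl
      by_cases h : k % 2 = 0
      · simp only [h, if_true, hcol]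
        rw [join_cons, String.append_assoc]
      · simp only [h, if_false, hcol]
        rw [List.reverse_cons, join_append]
        simp only [String.join, List.foldl_cons, List.foldl_nil, String.empty_append,
          String.append_assoc]

lemma getD_const_empty (l : List Int) (k : Nat) :
    (l.map (fun _ => "")).getD k "" = "" := by
  rw [List.getD_eq_getElem?_getD, List.getElem?_map]
  cases l[k]? <;> rfl

-- B is the same join over columns as A
lemma B_eq (matrix : List (List String)) :
    zig_zag_concatenate_alt matrix
      = String.join ((List.range ((matrix.getD 0 []).length)).map (fun k => colStr matrix k)) := by
  rw [alt_eq_rowPass]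
  set w := (matrix.getD 0 []).length with hw
  have hb0 : ((PySem.List.pyRange 0 (PySem.List.len (PySem.List.pyGetD matrix 0 [])) 1).map
      (fun _ => "")) = (PySem.List.pyRange 0 (w : Int) 1).map (fun _ => "") := by
    rw [PySem.List.len_eq, PySem.List.pyGetD_zero]
  rw [hb0]
  set bs0 := (PySem.List.pyRange 0 (w : Int) 1).map (fun _ => "") with hbs0
  have hlen0 : bs0.length = w := by
    rw [hbs0, List.length_map, PySem.List.length_pyRange_one]; omega
  have hget0 : ∀ k : Nat, bs0.getD k "" = "" := fun k => getD_const_empty _ k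
  apply congrArg
  apply List.ext_getElem
  · rw [rows_length, hlen0, List.length_map, List.length_range]
  · intro k h1 h2
    have hkw : k < w := by
      rw [rows_length, hlen0] at h1; exact h1
    have hval := rows_getD matrix bs0 k (by rw [hlen0]; exact hkw)
    rw [List.getD_eq_getElem?_getD, List.getElem?_eq_getElem h1] at hval
    simp only [Option.getD_some] at hval
    rw [hval]
    rw [List.getElem_map, List.getElem_range]
    rw [hget0 k]
    unfold colStr
    by_cases h : k % 2 = 0
    · simp [h]
    · simp [h]

-- ===== VERDICT (by name: the statement is the Claim_ definition above) =====
theorem zig_zag_concatenate_spec : Claim_equal_zig_zag_concatenate := by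
  intro matrix _ _
  unfold Spec_zig_zag_concatenate
  rw [A_eq, B_eq]
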